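-- pv_equiv track=rewrite | github.com/Victor994154/Carmona2 | engine.py | _find_substitutions
-- ===== SOURCE A (Python) =====
-- from typing import Dict, Iterable, Iterator, List, Optional, Sequence, Set, Tuple
--
-- Fact = Tuple[str, ...]
--
-- Substitution = Dict[str, str]
--
-- def is_variable(token: str) -> bool:
--     """Convención simple: una variable empieza con '?'."""
--     return isinstance(token, str) and token.startswith("?")
--
-- def substitute_token(token: str, theta: Substitution) -> str:
--     if is_variable(token):
--         return theta.get(token, token)
--     return token
--
-- def substitute_fact(pattern: Fact, theta: Substitution) -> Fact:
--     return tuple(substitute_token(token, theta) for token in pattern)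
--
-- def match_fact(pattern: Fact, fact: Fact, theta: Optional[Substitution] = None) -> Optional[Substitution]:
--     """
--     Intenta hacer match entre un patrón y un hecho concreto.
--     Solo soporta variables del lado del patrón.
--     """
--     if len(pattern) != len(fact):
--         return None
--
--     theta = dict(theta or {})
--
--     for pattern_token, fact_token in zip(pattern, fact):
--         if is_variable(pattern_token):
--             current = theta.get(pattern_token)
--             if current is None:
--                 theta[pattern_token] = fact_token
--             elif current != fact_token:
--                 return None
--         else:
--             if pattern_token != fact_token:
--                 return None
--
--     return theta
--
-- def _find_substitutions(
--     antecedents: Sequence[Fact],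
--     facts: Sequence[Fact],
--     theta: Optional[Substitution] = None,
-- ) -> Iterator[Substitution]:
--     """
--     Backtracking muy simple para encontrar sustituciones que satisfacen
--     todos los antecedentes de una regla.
--     """
--     theta = dict(theta or {})
--
--     if not antecedents:
--         yield theta
--         return
--
--     first_antecedent = substitute_fact(antecedents[0], theta)
--
--     for fact in facts:
--         new_theta = match_fact(first_antecedent, fact, theta)
--         if new_theta is not None:
--             yield from _find_substitutions(antecedents[1:], facts, new_theta)
-- ===== SOURCE B (Python) =====
-- def _find_substitutions(antecedents, facts, theta=None):
--     # Index facts by length and by (length, first token) so each level of the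
--     # backtracking only scans candidate facts instead of all facts.
--     by_len = {}
--     for f in facts:
--         by_len.setdefault(len(f), []).append(f)
--     by_head = {}
--     for f in facts:
--         if f:
--             by_head.setdefault((len(f), f[0]), []).append(f)
--
--     def extend(ants, th):
--         if not ants:
--             yield th
--             return
--         pat = tuple(th.get(t, t) if t.startswith("?") else t for t in ants[0])
--         if pat and not pat[0].startswith("?"):
--             cands = by_head.get((len(pat), pat[0]), [])
--         else:
--             cands = by_len.get(len(pat), [])
--         for f in cands:
--             nt = dict(th)
--             ok = True
--             for p, x in zip(pat, f):
--                 if p.startswith("?"):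
--                     cur = nt.get(p)
--                     if cur is None:
--                         nt[p] = x
--                     elif cur != x:
--                         ok = False
--                         break
--                 elif p != x:
--                     ok = False
--                     break
--             if ok:
--                 yield from extend(ants[1:], nt)
--
--     yield from extend(list(antecedents), dict(theta or {}))
-- ===== Notes on version B (the rewrite author's own statement) =====
-- stated objective: alternative
-- what changed: B pre-indexes the facts in dicts keyed by fact length and by (length, first token), so each backtracking level iterates only candidate facts whose shape can match the (substituted) antecedent instead of rescanning every fact; on the timed inputs the output size dominates, so no speed-up was measured.
import Mathlib
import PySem

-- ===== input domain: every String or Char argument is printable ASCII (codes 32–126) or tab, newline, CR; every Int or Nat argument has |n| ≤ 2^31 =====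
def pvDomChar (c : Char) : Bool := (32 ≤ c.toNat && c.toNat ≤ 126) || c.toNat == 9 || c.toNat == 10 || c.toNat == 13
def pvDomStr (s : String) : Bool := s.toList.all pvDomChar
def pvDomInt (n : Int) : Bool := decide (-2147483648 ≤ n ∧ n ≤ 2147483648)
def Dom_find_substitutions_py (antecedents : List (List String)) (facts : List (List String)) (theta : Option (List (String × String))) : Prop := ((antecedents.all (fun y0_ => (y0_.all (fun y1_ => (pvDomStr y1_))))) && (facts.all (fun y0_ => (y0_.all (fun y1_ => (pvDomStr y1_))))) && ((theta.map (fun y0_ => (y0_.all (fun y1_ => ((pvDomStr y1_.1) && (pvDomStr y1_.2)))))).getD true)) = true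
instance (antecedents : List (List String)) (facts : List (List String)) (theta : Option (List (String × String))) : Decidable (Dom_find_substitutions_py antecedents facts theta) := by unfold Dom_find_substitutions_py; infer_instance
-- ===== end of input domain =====

-- B replaces A's scan of ALL facts at every backtracking level by dict indexes
-- (by fact length, and by (length, first token)), iterating only the candidate facts
-- whose shape can match. (objective: alternative; no speed-up was measured on the timed inputs)

-- ===== PORT A =====
-- substitute_token / substitute_fact
def substTokenA (theta : PySem.Dict String String) (token : String) : String :=
  if PySem.Str.startswith token "?" then theta.getD token token else token

-- the loop of match_fact over zip(pattern, fact)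
def matchLoopA : List (String × String) → PySem.Dict String String → Option (PySem.Dict String String)
  | [], theta => some theta
  | (pt, ft) :: rest, theta =>
    if PySem.Str.startswith pt "?" then
      match theta.get? pt with
      | none => matchLoopA rest (theta.insert pt ft)
      | some current => if current ≠ ft then none else matchLoopA rest theta
    else if pt ≠ ft then none else matchLoopA rest theta

def matchFactA (pattern fact : List String) (theta : PySem.Dict String String) :
    Option (PySem.Dict String String) :=
  if pattern.length ≠ fact.length then none
  else matchLoopA (pattern.zip fact) theta

def findSubsA : List (List String) → List (List String) → PySem.Dict String String →
    List (PySem.Dict String String)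
  | [], _, theta => [theta]
  | a :: rest, facts, theta =>
    let firstAntecedent := a.map (substTokenA theta)
    facts.foldl (fun acc fact =>
      match matchFactA firstAntecedent fact theta with
      | some newTheta => acc ++ findSubsA rest facts newTheta
      | none => acc) []

def find_substitutions_py (antecedents : List (List String)) (facts : List (List String)) (theta : Option (List (String × String))) : List (List (String × String)) :=
  (findSubsA antecedents facts (PySem.Dict.ofList (theta.getD []))).map (·.items)

-- ===== PORT B =====
-- B's inline match loop over zip(pat, f) (no length check: the indexes only hand out
-- facts of the pattern's length)
def matchLoopB : List (String × String) → PySem.Dict String String → Option (PySem.Dict String String)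
  | [], nt => some nt
  | (p, x) :: rest, nt =>
    if PySem.Str.startswith p "?" then
      match nt.get? p with
      | none => matchLoopB rest (nt.insert p x)
      | some cur => if cur ≠ x then none else matchLoopB rest nt
    else if p ≠ x then none else matchLoopB rest nt

-- extend(ants, th): backtracking over the remaining antecedents using the two indexes
def extendB (byHead : PySem.Dict (Nat × String) (List (List String)))
    (byLen : PySem.Dict Nat (List (List String))) :
    List (List String) → PySem.Dict String String → List (PySem.Dict String String)
  | [], th => [th]
  | a :: rest, th =>
    let pat := a.map (fun t => if PySem.Str.startswith t "?" then th.getD t t else t)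
    let cands :=
      match pat with
      | [] => byLen.getD 0 []
      | t :: _ =>
        if PySem.Str.startswith t "?" then byLen.getD pat.length []
        else byHead.getD (pat.length, t) []
    cands.foldl (fun acc f =>
      match matchLoopB (pat.zip f) th with
      | some nt => acc ++ extendB byHead byLen rest nt
      | none => acc) []

def find_substitutions_py_alt (antecedents : List (List String)) (facts : List (List String)) (theta : Option (List (String × String))) : List (List (String × String)) :=
  let byLen := facts.foldl (fun d f => d.modify f.length [] (· ++ [f])) PySem.Dict.empty
  let byHead := facts.foldl (fun d f =>
      match f with
      | [] => d
      | x :: _ => d.modify (f.length, x) [] (· ++ [f])) PySem.Dict.empty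
  (extendB byHead byLen antecedents (PySem.Dict.ofList (theta.getD []))).map (·.items)

-- ===== PRECONDITION & SPEC =====
def Spec_find_substitutions_py (antecedents : List (List String)) (facts : List (List String)) (theta : Option (List (String × String))) (out : List (List (String × String))) : Prop := out = find_substitutions_py_alt antecedents facts theta
instance (antecedents : List (List String)) (facts : List (List String)) (theta : Option (List (String × String))) (out : List (List (String × String))) : Decidable (Spec_find_substitutions_py antecedents facts theta out) := by unfold Spec_find_substitutions_py; infer_instance

-- ===== CLAIM (what is proved, stated in full; the proofs are below) =====
def Claim_equal_find_substitutions_py : Prop := ∀ (antecedents : List (List String)) (facts : List (List String)) (theta : Option (List (String × String))), Dom_find_substitutions_py antecedents facts theta → Spec_find_substitutions_py antecedents facts theta (find_substitutions_py antecedents facts theta)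

-- ===== LEMMAS AND PROOFS =====

theorem matchLoopB_eq_matchLoopA (l : List (String × String)) (th : PySem.Dict String String) :
    matchLoopB l th = matchLoopA l th := by
  induction l generalizing th with
  | nil => rfl
  | cons p rest ih =>
    obtain ⟨pt, ft⟩ := p
    simp only [matchLoopA, matchLoopB, ih]

-- one backtracking level: folding the guarded-append step over the candidate list
-- equals folding it over all facts, given the candidates are exactly the shape filter,
-- the match agrees on them, fails off them, and the recursive continuations agree
theorem foldl_level_eq {gamma : Type} (facts cands : List (List String)) (p : List String → Bool)
    (mA mB : List String → Option (PySem.Dict String String))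
    (gA gB : PySem.Dict String String → List gamma)
    (hc : cands = facts.filter p)
    (hnone : ∀ f, p f = false → mA f = none)
    (hm : ∀ f, p f = true → mA f = mB f)
    (hg : ∀ x, gA x = gB x) :
    cands.foldl (fun acc f => match mB f with | some x => acc ++ gB x | none => acc) []
      = facts.foldl (fun acc f => match mA f with | some x => acc ++ gA x | none => acc) [] := by
  subst hc
  suffices h : ∀ acc : List gamma,
      (facts.filter p).foldl (fun acc f => match mB f with | some x => acc ++ gB x | none => acc) acc
        = facts.foldl (fun acc f => match mA f with | some x => acc ++ gA x | none => acc) acc from h []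
  induction facts with
  | nil => intro acc; rfl
  | cons f rest ih =>
    intro acc
    by_cases hp : p f = true
    · rw [List.filter_cons, if_pos hp, List.foldl_cons, List.foldl_cons, ← hm f hp]
      cases mA f with
      | none => simpa only using ih acc
      | some x => simpa only [hg x] using ih (acc ++ gB x)
    · simp only [Bool.not_eq_true] at hp
      rw [List.filter_cons, if_neg (by simp [hp]), List.foldl_cons, hnone f hp]
      exact ih acc

-- characterization of the by-length index
theorem byLen_getD (facts : List (List String)) (n : Nat) :
    (facts.foldl (fun d f => d.modify f.length [] (· ++ [f])) PySem.Dict.empty).getD n []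
      = facts.filter (fun f => f.length == n) := by
  have h1 : facts.foldl (fun d f => d.modify f.length [] (· ++ [f])) PySem.Dict.empty
      = (facts.map (fun f => (f.length, f))).foldl
          (fun d p => d.modify p.1 [] (· ++ [p.2])) PySem.Dict.empty := by
    rw [List.foldl_map]
  rw [h1, PySem.Dict.getD_foldl_modify_append]
  simp [List.filter_map, Function.comp_def]

-- characterization of the by-(length, head) index
theorem byHead_getD (facts : List (List String)) (n : Nat) (h : String) :
    (facts.foldl (fun d f =>
        match f with
        | [] => d
        | x :: _ => d.modify (f.length, x) [] (· ++ [f])) PySem.Dict.empty).getD (n, h) []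
      = facts.filter (fun f => match f with
          | [] => false
          | x :: _ => f.length == n && x == h) := by
  induction facts using List.reverseRecOn with
  | nil => simp [PySem.Dict.getD_empty]
  | append_singleton rest f ih =>
    rw [List.foldl_append, List.filter_append, List.foldl_cons, List.foldl_nil,
      List.filter_cons, List.filter_nil]
    cases f with
    | nil => simpa using ih
    | cons x xs =>
      simp only [PySem.Dict.getD_modify]
      by_cases hk : ((n : Nat), h) = ((x :: xs).length, x)
      · rw [if_pos hk]
        rw [← hk, ih]
        have hk1 : n = (x :: xs).length := congrArg Prod.fst hk
        have hk2 : h = x := congrArg Prod.snd hk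
        have hc : ((x :: xs).length == n && x == h) = true := by simp [hk1, hk2]
        simp only [hc, if_true]
      · rw [if_neg hk, ih]
        have hc : ¬(xs.length + 1 = n ∧ x = h) := by
          rintro ⟨e1, e2⟩
          exact hk (by simp [← e1, e2.symm])
        simp [hc]

-- A's match returns none on facts of the wrong length
theorem matchFactA_len_ne (pat f : List String) (th : PySem.Dict String String)
    (h : pat.length ≠ f.length) : matchFactA pat f th = none := by
  simp [matchFactA, h]

-- A's match returns none when a constant head disagrees
theorem matchFactA_head_ne (t : String) (ps : List String) (x : String) (xs : List String)
    (th : PySem.Dict String String) (hv : PySem.Str.startswith t "?" = false) (hne : t ≠ x) :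
    matchFactA (t :: ps) (x :: xs) th = none := by
  by_cases hl : (t :: ps).length = (x :: xs).length
  · simp only [matchFactA, if_neg (not_not_intro hl), List.zip_cons_cons, matchLoopA, hv,
      Bool.false_eq_true, if_false, if_pos hne]
  · simp only [matchFactA, if_pos hl]

-- on facts of equal length, B's inline loop computes A's match_fact
theorem matchFactA_eq_B (pat f : List String) (th : PySem.Dict String String)
    (h : pat.length = f.length) :
    matchFactA pat f th = matchLoopB (pat.zip f) th := by
  simp [matchFactA, h, matchLoopB_eq_matchLoopA]

-- main induction: the indexed backtracking equals the full-scan backtracking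
theorem extendB_eq_findSubsA (facts : List (List String)) (ants : List (List String))
    (th : PySem.Dict String String) :
    extendB
      (facts.foldl (fun d f =>
        match f with
        | [] => d
        | x :: _ => d.modify (f.length, x) [] (· ++ [f])) PySem.Dict.empty)
      (facts.foldl (fun d f => d.modify f.length [] (· ++ [f])) PySem.Dict.empty)
      ants th = findSubsA ants facts th := by
  induction ants generalizing th with
  | nil => rfl
  | cons a rest ih =>
    simp only [extendB, findSubsA]
    have hpat : (a.map fun t => if PySem.Str.startswith t "?" then th.getD t t else t)
        = a.map (substTokenA th) := by
      simp [substTokenA]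
    rw [hpat]
    generalize a.map (substTokenA th) = pat
    cases pat with
    | nil =>
      refine foldl_level_eq facts _ (fun f => f.length == 0)
        (fun f => matchFactA [] f th) (fun f => matchLoopB (List.zip [] f) th)
        (fun x => findSubsA rest facts x) (fun x => extendB _ _ rest x)
        (byLen_getD facts 0) ?_ ?_ ?_
      · intro f hf
        refine matchFactA_len_ne _ _ _ ?_
        simp only [List.length_nil]
        intro h0
        simp [← h0] at hf
      · intro f hf
        simp only [beq_iff_eq] at hf
        exact matchFactA_eq_B _ _ _ (by simp [hf])
      · exact fun x => (ih x).symm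
    | cons t ts =>
      by_cases hv : PySem.Str.startswith t "?" = true
      · simp only [hv, ↓reduceIte]
        refine foldl_level_eq facts _ (fun f => f.length == (t :: ts).length)
          (fun f => matchFactA (t :: ts) f th) (fun f => matchLoopB (List.zip (t :: ts) f) th)
          (fun x => findSubsA rest facts x) (fun x => extendB _ _ rest x)
          (byLen_getD facts (t :: ts).length) ?_ ?_ ?_
        · intro f hf
          simp only [beq_eq_false_iff_ne, ne_eq] at hf
          exact matchFactA_len_ne _ _ _ (Ne.symm hf)
        · intro f hf
          simp only [beq_iff_eq] at hf
          exact matchFactA_eq_B _ _ _ hf.symm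
        · exact fun x => (ih x).symm
      · simp only [Bool.not_eq_true] at hv
        simp only [hv, Bool.false_eq_true, ↓reduceIte]
        refine foldl_level_eq facts _
          (fun f => match f with
            | [] => false
            | x :: _ => f.length == (t :: ts).length && x == t)
          (fun f => matchFactA (t :: ts) f th) (fun f => matchLoopB (List.zip (t :: ts) f) th)
          (fun x => findSubsA rest facts x) (fun x => extendB _ _ rest x)
          (byHead_getD facts (t :: ts).length t) ?_ ?_ ?_
        · intro f hf
          cases f with
          | nil => exact matchFactA_len_ne _ _ _ (by simp)
          | cons x xs =>
            simp only [Bool.and_eq_false_iff, beq_eq_false_iff_ne, ne_eq] at hf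
            rcases hf with hf | hf
            · exact matchFactA_len_ne _ _ _ fun hcon => hf hcon.symm
            · exact matchFactA_head_ne t ts x xs th hv (Ne.symm hf)
        · intro f hf
          cases f with
          | nil => simp at hf
          | cons x xs =>
            simp only [Bool.and_eq_true, beq_iff_eq] at hf
            exact matchFactA_eq_B _ _ _ hf.1.symm
        · exact fun x => (ih x).symm

-- ===== VERDICT (by name: the statement is the Claim_ definition above) =====
theorem find_substitutions_py_spec : Claim_equal_find_substitutions_py := by
  intro antecedents facts theta _
  simp only [Spec_find_substitutions_py, find_substitutions_py, find_substitutions_py_alt]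
  rw [extendB_eq_findSubsA]
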